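-- pv_equiv track=rewrite | github.com/valeriam07/Obstacle-Detection-System | model/utils.py | generate_cell_indices
-- ===== SOURCE A (Python) =====
-- def generate_cell_indices(total_size, num_cells):
--     """
--     :param total_size: size que se quiere dividir en celdas, width o height
--     :param num_cells: numero de celdas en las que se quiere dividir
--     """
--     base = total_size // num_cells
--     remainder = total_size % num_cells
--
--     indices = []
--     current = 0
--     for i in range(num_cells):
--         extra = 1 if i < remainder else 0
--         start = current
--         end = start + base + extra
--         indices.append((start, end))
--         current = end
--     return indices
-- ===== SOURCE B (Python) =====
-- def generate_cell_indices(total_size, num_cells):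
--     base = total_size // num_cells
--     remainder = total_size % num_cells
--     return [(i * base + min(i, remainder), (i + 1) * base + min(i + 1, remainder))
--             for i in range(num_cells)]
-- ===== Notes on version B (the rewrite author's own statement) =====
-- stated objective: alternative
-- what changed: The accumulator-threaded loop (running 'current' position) is replaced by a stateless comprehension computing each cell's start/end directly from its index via the closed form i*base + min(i, remainder).
import Mathlib
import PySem

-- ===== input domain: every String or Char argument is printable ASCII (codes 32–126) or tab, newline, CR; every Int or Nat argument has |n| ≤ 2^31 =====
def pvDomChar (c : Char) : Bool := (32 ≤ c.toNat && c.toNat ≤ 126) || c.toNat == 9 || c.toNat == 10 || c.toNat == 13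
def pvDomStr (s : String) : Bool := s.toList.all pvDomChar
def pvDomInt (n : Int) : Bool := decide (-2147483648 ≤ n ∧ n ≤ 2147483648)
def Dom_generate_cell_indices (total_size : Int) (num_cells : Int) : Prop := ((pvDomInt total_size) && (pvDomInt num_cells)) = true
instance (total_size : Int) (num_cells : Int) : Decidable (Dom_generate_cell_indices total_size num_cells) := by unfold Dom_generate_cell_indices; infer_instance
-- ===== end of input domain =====

-- B replaces A's accumulator-threaded loop with a stateless closed-form position per cell (objective: alternative decomposition).

-- ===== PORT A =====
-- accumulator loop: state (indices, current)
def generate_cell_indices (total_size : Int) (num_cells : Int) : List (Int × Int) :=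
  let base := PySem.Int.floordiv total_size num_cells
  let remainder := PySem.Int.mod total_size num_cells
  let r := (PySem.List.pyRange 0 num_cells 1).foldl
    (fun (st : List (Int × Int) × Int) i =>
      let extra : Int := if i < remainder then 1 else 0
      let start := st.2
      let «end» := start + base + extra
      (st.1 ++ [(start, «end»)], «end»))
    ([], 0)
  r.1

-- ===== PORT B =====
def generate_cell_indices_alt (total_size : Int) (num_cells : Int) : List (Int × Int) :=
  let base := PySem.Int.floordiv total_size num_cells
  let remainder := PySem.Int.mod total_size num_cells
  (PySem.List.pyRange 0 num_cells 1).map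
    (fun i => (i * base + min i remainder, (i + 1) * base + min (i + 1) remainder))

-- ===== PRECONDITION & SPEC =====
-- A raises ZeroDivisionError when num_cells == 0 (so does B); Pre_ excludes exactly that.
def Pre_generate_cell_indices (total_size : Int) (num_cells : Int) : Prop := num_cells ≠ 0
instance (total_size : Int) (num_cells : Int) : Decidable (Pre_generate_cell_indices total_size num_cells) := by unfold Pre_generate_cell_indices; infer_instance
def pvWitness_generate_cell_indices : Int × Int := (10, 3)

def Spec_generate_cell_indices (total_size : Int) (num_cells : Int) (out : List (Int × Int)) : Prop := out = generate_cell_indices_alt total_size num_cells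
instance (total_size : Int) (num_cells : Int) (out : List (Int × Int)) : Decidable (Spec_generate_cell_indices total_size num_cells out) := by unfold Spec_generate_cell_indices; infer_instance

-- ===== CLAIM (what is proved, stated in full; the proofs are below) =====
def Claim_equal_generate_cell_indices : Prop := ∀ (total_size : Int) (num_cells : Int), Dom_generate_cell_indices total_size num_cells → Pre_generate_cell_indices total_size num_cells → Spec_generate_cell_indices total_size num_cells (generate_cell_indices total_size num_cells)

-- ===== LEMMAS AND PROOFS =====

-- invariant of A's loop over range(n): result so far is B's closed-form prefix, current = n*base + min n rem
theorem gci_loop_inv (base rem : Int) (hrem : 0 ≤ rem) (n : Nat) :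
    ((List.range n).map (fun k : Nat => (↑k : Int))).foldl
      (fun (st : List (Int × Int) × Int) i =>
        let extra : Int := if i < rem then 1 else 0
        let start := st.2
        let «end» := start + base + extra
        (st.1 ++ [(start, «end»)], «end»))
      ([], 0)
    = (((List.range n).map (fun k : Nat => (↑k : Int))).map
        (fun i => (i * base + min i rem, (i + 1) * base + min (i + 1) rem)),
       (n : Int) * base + min (n : Int) rem) := by
  induction n with
  | zero =>
    simp only [List.range_zero, List.map_nil, List.foldl_nil, Nat.cast_zero]
    refine Prod.ext rfl ?_
    simp only
    omega
  | succ n ih =>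
    rw [List.range_succ, List.map_append, List.foldl_append, ih]
    simp only [List.map_cons, List.map_nil, List.foldl_cons, List.foldl_nil, List.map_append]
    have h1 : ((n : Int) * base + min (n : Int) rem) + base + (if (n : Int) < rem then 1 else 0)
        = ((n : Int) + 1) * base + min ((n : Int) + 1) rem := by
      split_ifs with h <;> ring_nf <;> omega
    refine Prod.ext ?_ ?_ <;> simp only <;> rw [h1] <;> push_cast <;> rfl

theorem generate_cell_indices_eq_alt (total_size num_cells : Int) (h : num_cells ≠ 0) :
    generate_cell_indices total_size num_cells = generate_cell_indices_alt total_size num_cells := by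
  simp only [generate_cell_indices, generate_cell_indices_alt]
  rcases lt_trichotomy num_cells 0 with h1 | h1 | h1
  · have hempty : PySem.List.pyRange 0 num_cells 1 = [] := by
      rw [PySem.List.pyRange_one]
      simp
      omega
    rw [hempty]; rfl
  · exact absurd h1 h
  · have hrem : 0 ≤ PySem.Int.mod total_size num_cells := PySem.Int.mod_nonneg total_size h1
    have hlist : PySem.List.pyRange 0 num_cells 1
        = (List.range num_cells.toNat).map (fun k : Nat => (↑k : Int)) := by
      rw [PySem.List.pyRange_one]
      simp
    rw [hlist, gci_loop_inv _ _ hrem]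

-- ===== VERDICT (by name: the statement is the Claim_ definition above) =====
theorem generate_cell_indices_spec : Claim_equal_generate_cell_indices := by
  intro t n _ hpre
  unfold Spec_generate_cell_indices
  exact generate_cell_indices_eq_alt t n hpre
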